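-- pv_equiv track=rewrite | github.com/worgarside/CubeSolver | PC/group_solver/position_generator.py | code_position
-- ===== SOURCE A (Python) =====
-- def code_position(position):
--     colors = []
--     pos_coded = ""
--
--     for color in position:
--         if color not in colors:
--             colors.append(color)
--
--         pos_coded += str(colors.index(color))
--
--     return pos_coded
-- ===== SOURCE B (Python) =====
-- def code_position(position):
--     return ''.join(
--         str(len(set(position[:position.index(c)])))
--         for c in position
--     )
-- ===== Notes on version B (the rewrite author's own statement) =====
-- stated objective: alternative
-- what changed: Replaces A's stateful loop (a growing first-occurrence list rescanned with list.index per character) by a stateless per-character closed form: each character's code is len(set(position[:position.index(c)])), the number of distinct characters before its first occurrence, computed independently and joined.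
import Mathlib
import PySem

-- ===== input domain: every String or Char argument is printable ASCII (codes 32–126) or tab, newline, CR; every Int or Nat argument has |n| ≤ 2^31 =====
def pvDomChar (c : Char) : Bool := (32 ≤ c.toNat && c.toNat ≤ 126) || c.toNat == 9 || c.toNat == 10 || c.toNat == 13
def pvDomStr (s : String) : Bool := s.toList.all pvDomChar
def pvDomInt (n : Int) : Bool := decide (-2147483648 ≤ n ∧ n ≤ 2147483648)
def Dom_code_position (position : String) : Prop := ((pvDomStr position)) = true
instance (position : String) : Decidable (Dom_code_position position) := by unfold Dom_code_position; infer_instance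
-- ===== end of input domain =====

-- B replaces A's incremental accumulator loop (a growing first-occurrence list rescanned
-- with list.index at every character) by a per-character closed form: each character's
-- code is the number of distinct characters strictly before its first occurrence,
-- len(set(position[:position.index(c)])), with no state carried between characters
-- (objective: alternative).

-- ===== PORT A =====
-- A's loop, carrying (colors, pos_coded); colors.index(color) is PySem.List.index?;
-- after the conditional append the element is always in colors, so `.getD 0` never
-- takes its default (exact).
def codePosLoopA : List Char → List Char → List Char → List Char
  | [], _, acc => acc
  | c :: rest, colors, acc =>
    let colors' := if colors.contains c then colors else colors ++ [c]
    codePosLoopA rest colors'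
      (acc ++ PySem.Int.toChars (((PySem.List.index? colors' c).getD 0 : Nat) : Int))

def code_position (position : String) : String :=
  String.ofList (codePosLoopA position.toList [] [])

-- ===== PORT B =====
-- Source B's generator expression: for each character c, str(len(set(position[:position.index(c)]))),
-- joined; position.index(c) always succeeds (c is drawn from position), so `.getD 0`
-- never takes its default (exact).
def code_position_alt (position : String) : String :=
  let l := position.toList
  String.ofList (PySem.Chars.join []
    (l.map (fun c => PySem.Int.toChars
      ((PySem.Set.ofList
          (PySem.List.slice l none (some (((PySem.List.index? l c).getD 0 : Nat) : Int)))).length : Int))))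

-- ===== PRECONDITION & SPEC =====
def Spec_code_position (position : String) (out : String) : Prop := out = code_position_alt position
instance (position : String) (out : String) : Decidable (Spec_code_position position out) := by unfold Spec_code_position; infer_instance

-- ===== CLAIM (what is proved, stated in full; the proofs are below) =====
def Claim_equal_code_position : Prop := ∀ (position : String), Dom_code_position position → Spec_code_position position (code_position position)

-- ===== LEMMAS AND PROOFS =====

-- ''.join over a cons
theorem codePos_join_nil_cons (x : List Char) (xs : List (List Char)) :
    PySem.Chars.join [] (x :: xs) = x ++ PySem.Chars.join [] xs := by
  cases xs with
  | nil => simp [PySem.Chars.join, List.intercalate]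
  | cons y ys => simp [PySem.Chars.join_cons_cons]

-- first-occurrence structure of set(q): the distinct elements whose first occurrence
-- precedes the first occurrence of c come first, then c itself
theorem codePos_ofList_split (q : List Char) (c : Char) (k : Nat)
    (h : PySem.List.index? q c = some k) :
    ∃ s, PySem.Set.ofList q = PySem.Set.ofList (q.take k) ++ c :: s := by
  induction q generalizing k with
  | nil => simp [PySem.List.index?_eq_idxOf?] at h
  | cons x r ih =>
    by_cases hc : x = c
    · subst hc
      rw [PySem.List.index?_cons_self] at h
      cases h
      exact ⟨(PySem.Set.ofList r).discard x, by simp [PySem.Set.ofList_cons]⟩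
    · rw [PySem.List.index?_cons_of_ne _ hc] at h
      obtain ⟨m, hm, rfl⟩ := Option.map_eq_some_iff.mp h
      obtain ⟨s, hs⟩ := ih m hm
      refine ⟨PySem.Set.discard s x, ?_⟩
      have hcx : (c == x) = false := by simp [Ne.symm hc]
      simp [PySem.Set.ofList_cons, hs, PySem.Set.discard, List.filter_append, hcx]

-- the element c is not among the earlier distinct elements
theorem codePos_not_mem_take (q : List Char) (c : Char) (k : Nat)
    (h : PySem.List.index? q c = some k) : c ∉ q.take k := by
  obtain ⟨pre, suf, hq, hlen, hpre⟩ := (PySem.List.index?_eq_some_iff q c k).mp h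
  subst hq; subst hlen
  simpa [List.take_left] using hpre

-- core: for c ∈ q, the index of c in the first-occurrence list set(q) is the number of
-- distinct elements of the prefix before c's first occurrence
theorem codePos_index_ofList (q : List Char) (c : Char) (k : Nat)
    (h : PySem.List.index? q c = some k) :
    PySem.List.index? (PySem.Set.ofList q) c
      = some ((PySem.Set.ofList (q.take k)).length) := by
  obtain ⟨s, hs⟩ := codePos_ofList_split q c k h
  have hnm : c ∉ PySem.Set.ofList (q.take k) := by
    rw [PySem.Set.mem_ofList]; exact codePos_not_mem_take q c k h
  exact (PySem.List.index?_eq_some_iff _ _ _).mpr ⟨_, s, hs, rfl, hnm⟩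

-- main invariant: with colors = set(p) (first-occurrence order), A's loop over cs emits
-- exactly B's closed-form values relative to the full string p ++ cs
theorem codePos_main (cs : List Char) :
    ∀ (p acc : List Char),
    codePosLoopA cs (PySem.Set.ofList p) acc =
      acc ++ PySem.Chars.join []
        (cs.map (fun c => PySem.Int.toChars
          ((PySem.Set.ofList
            ((p ++ cs).take ((PySem.List.index? (p ++ cs) c).getD 0))).length : Int))) := by
  induction cs with
  | nil => intro p acc; simp [codePosLoopA, PySem.Chars.join, List.intercalate]
  | cons c rest ih =>
    intro p acc
    have hadd : (if List.contains (PySem.Set.ofList p) c then (PySem.Set.ofList p)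
        else (PySem.Set.ofList p) ++ [c]) = PySem.Set.ofList (p ++ [c]) := by
      rw [PySem.Set.ofList_append_singleton]; rfl
    have hidx : (PySem.List.index? (PySem.Set.ofList (p ++ [c])) c).getD 0
        = (PySem.Set.ofList
            ((p ++ c :: rest).take ((PySem.List.index? (p ++ c :: rest) c).getD 0))).length := by
      by_cases hcp : c ∈ p
      · obtain ⟨k, hk⟩ := Option.isSome_iff_exists.mp ((PySem.List.index?_isSome_iff p c).mpr hcp)
        have h1 : PySem.List.index? (p ++ c :: rest) c = some k := by
          rw [PySem.List.index?_append_of_mem _ hcp, hk]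
        have hkle : k ≤ p.length := by
          obtain ⟨hlt, -, -⟩ := PySem.List.getElem_of_index?_eq_some hk
          omega
        have h2 : PySem.Set.ofList (p ++ [c]) = PySem.Set.ofList p := by
          rw [PySem.Set.ofList_append_singleton, PySem.Set.add_of_mem (by rw [PySem.Set.mem_ofList]; exact hcp)]
        rw [h1, h2, codePos_index_ofList p c k hk]
        simp [List.take_append_of_le_length hkle]
      · have h1 : PySem.List.index? (p ++ c :: rest) c = some p.length := by
          have : p ++ c :: rest = (p ++ [c]) ++ rest := by simp
          rw [this, PySem.List.index?_append_of_mem _ (by simp),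
            PySem.List.index?_append_singleton_self p c hcp]
        have h2 : PySem.Set.ofList (p ++ [c]) = PySem.Set.ofList p ++ [c] := by
          rw [PySem.Set.ofList_append_singleton, PySem.Set.add_of_not_mem (by rw [PySem.Set.mem_ofList]; exact hcp)]
        rw [h1, h2, PySem.List.index?_append_singleton_self _ c (by rw [PySem.Set.mem_ofList]; exact hcp)]
        simp
    rw [codePosLoopA]
    simp only [hadd]
    rw [ih (p ++ [c]), List.map_cons, codePos_join_nil_cons]
    rw [hidx]
    simp only [List.append_assoc, List.singleton_append]

-- ===== VERDICT (by name: the statement is the Claim_ definition above) =====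
theorem code_position_spec : Claim_equal_code_position := by
  intro position _
  unfold Spec_code_position code_position code_position_alt
  have h := codePos_main position.toList [] []
  simp only [PySem.Set.ofList_nil] at h
  rw [h]
  simp [PySem.List.slice_to_natCast]
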